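-- pv_equiv track=rewrite | github.com/nvd05/tinkoff-start | 2026-winter/exam/task_3/task_3.py | task_3
-- ===== SOURCE A (Python) =====
-- def task_3(t: int, s_arr: list) -> str:
-- 	'''
-- 	Решение задачи. Принимает входную строку, возвращает строку с ответами.
-- 	'''
--
-- 	out = []
--
-- 	for s in s_arr:
-- 		n = len(s)
--
-- 		# Если строка целиком из единиц
-- 		if '0' not in s:
-- 			out.append(str(n * n))
-- 			continue
--
-- 		# Максимальная длина последовательных единиц внутри строки
-- 		max_inner = 0
-- 		cur = 0
-- 		for ch in s:
-- 			if ch == '1':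
-- 				cur += 1
-- 				if cur > max_inner:
-- 					max_inner = cur
-- 			else:
-- 				cur = 0
--
-- 		# Длина префикса из единиц
-- 		pref = 0
-- 		for ch in s:
-- 			if ch == '1':
-- 				pref += 1
-- 			else:
-- 				break
--
-- 		# Длина суффикса из единиц
-- 		suff = 0
-- 		for ch in reversed(s):
-- 			if ch == '1':
-- 				suff += 1
-- 			else:
-- 				break
--
-- 		# Максимальный циклический отрезок из единиц
-- 		M = max(max_inner, pref + suff)
-- 		# Максимальная площадь: (M+1)*(M+1)//4
-- 		ans = (M + 1) * (M + 1) // 4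
-- 		out.append(str(ans))
--
-- 	return '\n'.join(out).strip()
-- ===== SOURCE B (Python) =====
-- def task_3(t: int, s_arr: list) -> str:
--     out = []
--     for s in s_arr:
--         n = len(s)
--         if '0' not in s:
--             out.append(str(n * n))
--         else:
--             # single pass over the doubled string: its max run of '1's is the
--             # max cyclic run of s (s contains a '0', so the run cannot wrap twice)
--             best = cur = 0
--             for ch in s + s:
--                 cur = cur + 1 if ch == '1' else 0
--                 best = max(best, cur)
--             out.append(str((best + 1) * (best + 1) // 4))
--     return '\n'.join(out).strip()
-- ===== Notes on version B (the rewrite author's own statement) =====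
-- stated objective: simpler
-- what changed: Replaces A's three separate scans per string (max inner run, prefix run, suffix run) by one scan of the doubled string s+s whose maximum run of '1's equals the cyclic maximum directly.
import Mathlib
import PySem

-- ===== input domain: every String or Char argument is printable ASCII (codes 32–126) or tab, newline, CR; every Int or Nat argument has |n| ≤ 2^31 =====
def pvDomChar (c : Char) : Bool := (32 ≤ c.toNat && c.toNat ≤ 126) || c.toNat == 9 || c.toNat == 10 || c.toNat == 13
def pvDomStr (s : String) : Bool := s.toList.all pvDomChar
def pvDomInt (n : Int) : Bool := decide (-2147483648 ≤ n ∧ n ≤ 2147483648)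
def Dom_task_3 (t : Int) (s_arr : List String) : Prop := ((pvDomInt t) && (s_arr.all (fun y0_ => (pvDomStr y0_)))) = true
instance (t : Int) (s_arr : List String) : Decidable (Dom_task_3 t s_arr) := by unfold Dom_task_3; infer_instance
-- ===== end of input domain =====

-- B replaces A's three separate per-string scans (inner run, prefix, suffix) by one
-- scan of the doubled string; objective: simpler.


-- ===== PORT A =====
-- A's inner loop: cur/max_inner over the characters ('if cur > max_inner' kept as the ite)
def aInner : List Char → Nat → Nat → Nat
  | [], _, mx => mx
  | c :: t, cur, mx =>
      if c = '1' then aInner t (cur + 1) (if cur + 1 > mx then cur + 1 else mx)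
      else aInner t 0 mx

-- A's prefix loop (for-with-break): count of leading '1's
def aPref : List Char → Nat
  | [] => 0
  | c :: t => if c = '1' then aPref t + 1 else 0

def aLine (s : String) : String :=
  let n : Int := PySem.Str.len s
  if PySem.Str.isIn "0" s = false then PySem.Int.toStr (n * n)
  else
    let maxInner := aInner s.toList 0 0
    let pref := aPref s.toList
    let suff := aPref s.toList.reverse
    let M := max maxInner (pref + suff)
    PySem.Int.toStr (PySem.Int.floordiv (((M : Int) + 1) * ((M : Int) + 1)) 4)

def task_3 (t : Int) (s_arr : List String) : String :=
  PySem.Str.strip (PySem.Str.join "\n" (s_arr.map aLine))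

-- ===== PORT B =====
-- B's single scan: cur' = cur+1 on '1' else 0, best = max best cur'
def bRun : List Char → Nat → Nat → Nat
  | [], _, best => best
  | c :: t, cur, best =>
      let cur' := if c = '1' then cur + 1 else 0
      bRun t cur' (max best cur')

def bLine (s : String) : String :=
  let n : Int := PySem.Str.len s
  if PySem.Str.isIn "0" s = false then PySem.Int.toStr (n * n)
  else
    let best := bRun (s.toList ++ s.toList) 0 0
    PySem.Int.toStr (PySem.Int.floordiv (((best : Int) + 1) * ((best : Int) + 1)) 4)

def task_3_alt (t : Int) (s_arr : List String) : String :=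
  PySem.Str.strip (PySem.Str.join "\n" (s_arr.map bLine))

-- ===== PRECONDITION & SPEC =====
def Spec_task_3 (t : Int) (s_arr : List String) (out : String) : Prop := out = task_3_alt t s_arr
instance (t : Int) (s_arr : List String) (out : String) : Decidable (Spec_task_3 t s_arr out) := by unfold Spec_task_3; infer_instance

-- ===== CLAIM (what is proved, stated in full; the proofs are below) =====
def Claim_equal_task_3 : Prop := ∀ (t : Int) (s_arr : List String), Dom_task_3 t s_arr → Spec_task_3 t s_arr (task_3 t s_arr)

-- ===== LEMMAS AND PROOFS =====

-- A's inner scan and B's scan compute the same fold (max mx 0 = mx on a reset)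
theorem aInner_eq_bRun (l : List Char) : ∀ cur mx, aInner l cur mx = bRun l cur mx := by
  induction l with
  | nil => intro cur mx; rfl
  | cons c t ih =>
    intro cur mx
    by_cases h : c = '1'
    · simp only [aInner, bRun, h, if_true, ih]
      congr 1
      split <;> omega
    · simp [aInner, bRun, h, ih]

-- the current-run value after scanning l starting from cur
def endRun : List Char → Nat → Nat
  | [], cur => cur
  | c :: t, cur => endRun t (if c = '1' then cur + 1 else 0)

theorem bRun_append (l1 : List Char) : ∀ (l2 : List Char) cur mx,
    bRun (l1 ++ l2) cur mx = bRun l2 (endRun l1 cur) (bRun l1 cur mx) := by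
  induction l1 with
  | nil => intro l2 cur mx; rfl
  | cons c t ih => intro l2 cur mx; simp [bRun, endRun, ih]

theorem bRun_hoist (l : List Char) : ∀ cur mx, bRun l cur mx = max mx (bRun l cur 0) := by
  induction l with
  | nil => intro cur mx; simp [bRun]
  | cons c t ih =>
    intro cur mx
    simp only [bRun]
    rw [ih _ (max mx _), ih _ (max 0 _)]
    omega

-- the suffix run A computes (prefix of the reverse) is the end-of-scan current run
theorem endRun_append (l1 : List Char) : ∀ (l2 : List Char) cur,
    endRun (l1 ++ l2) cur = endRun l2 (endRun l1 cur) := by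
  induction l1 with
  | nil => intro l2 cur; rfl
  | cons c t ih => intro l2 cur; simp [endRun, ih]

theorem suff_eq_endRun (l : List Char) : aPref l.reverse = endRun l 0 := by
  induction l using List.reverseRecOn with
  | nil => rfl
  | append_singleton t c ih => simp [aPref, endRun_append, endRun, ih]

theorem endRun_le_bRun (l : List Char) : ∀ cur mx, cur ≤ mx → endRun l cur ≤ bRun l cur mx := by
  induction l with
  | nil => intro cur mx h; simpa [endRun, bRun] using h
  | cons c t ih =>
    intro cur mx h
    simp only [endRun, bRun]
    exact ih _ _ (by omega)

-- key: starting the scan with an initial run cur, where l contains a non-'1'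
theorem bRun_initial (l : List Char) (hne : ∃ c ∈ l, c ≠ '1') : ∀ cur,
    bRun l cur 0 = max (if 0 < aPref l then cur + aPref l else 0) (bRun l 0 0) := by
  induction l with
  | nil => exact absurd hne (by simp)
  | cons c t ih =>
    intro cur
    by_cases h : c = '1'
    · have hnt : ∃ d ∈ t, d ≠ '1' := by
        rcases hne with ⟨d, hd, hd1⟩
        rcases List.mem_cons.1 hd with rfl | hdt
        · exact absurd h hd1
        · exact ⟨d, hdt, hd1⟩
      simp only [bRun, aPref, h, if_true]
      rw [bRun_hoist t (cur + 1), ih hnt (cur + 1), bRun_hoist t 1, ih hnt 1]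
      split_ifs <;> omega
    · simp [bRun, aPref, h]

theorem line_eq (s : String) : aLine s = bLine s := by
  unfold aLine bLine
  split_ifs with h0
  · rfl
  · have h1 : PySem.Str.isIn "0" s = true := by
      revert h0; cases PySem.Str.isIn "0" s <;> simp
    have hmem : '0' ∈ s.toList := by
      have := (PySem.Str.isIn_iff_infix "0" s).1 h1
      exact this.subset (by simp)
    have hne : ∃ c ∈ s.toList, c ≠ '1' := ⟨'0', hmem, by decide⟩
    have key : max (aInner s.toList 0 0) (aPref s.toList + aPref s.toList.reverse)
        = bRun (s.toList ++ s.toList) 0 0 := by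
      have e1 := bRun_append s.toList s.toList 0 0
      have e2 := bRun_hoist s.toList (endRun s.toList 0) (bRun s.toList 0 0)
      have e3 := bRun_initial s.toList hne (endRun s.toList 0)
      have hle := endRun_le_bRun s.toList 0 0 (le_refl 0)
      rw [aInner_eq_bRun, suff_eq_endRun, e1, e2, e3]
      split_ifs <;> omega
    simp only [key]

-- ===== VERDICT (by name: the statement is the Claim_ definition above) =====
theorem task_3_spec : Claim_equal_task_3 := by
  intro t s_arr _
  unfold Spec_task_3 task_3 task_3_alt
  rw [show aLine = bLine from funext line_eq]
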